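-- pv_equiv track=rewrite | github.com/seap-udea/multimin | setup.py | _strip_unsafe_rst_directives
-- ===== SOURCE A (Python) =====
-- def _strip_unsafe_rst_directives(rst_text: str) -> str:
--     """Remove .. raw:: and .. container:: blocks (PyPI disables raw directive)."""
--     lines = rst_text.splitlines()
--     out = []
--     i = 0
--     while i < len(lines):
--         line = lines[i]
--         stripped = line.strip()
--         if stripped == ".. container::":
--             i += 1
--             while i < len(lines) and (lines[i].startswith(" ") or lines[i].strip() == ""):
--                 i += 1
--             continue
--         if stripped.startswith(".. raw::"):
--             i += 1
--             while i < len(lines) and (lines[i].startswith(" ") or lines[i].strip() == ""):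
--                 i += 1
--             continue
--         out.append(line)
--         i += 1
--     return "\n".join(out).replace("\n\n\n\n", "\n\n")
-- ===== SOURCE B (Python) =====
-- def _strip_unsafe_rst_directives(rst_text: str) -> str:
--     """Remove .. raw:: and .. container:: blocks (PyPI disables raw directive)."""
--     out = []
--     skipping = False
--     for line in rst_text.splitlines():
--         if skipping and (line.startswith(" ") or line.strip() == ""):
--             continue
--         skipping = False
--         stripped = line.strip()
--         if stripped == ".. container::" or stripped.startswith(".. raw::"):
--             skipping = True
--         else:
--             out.append(line)
--     return "\n".join(out).replace("\n\n\n\n", "\n\n")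
-- ===== Notes on version B (the rewrite author's own statement) =====
-- stated objective: simpler
-- what changed: Replaced A's index-driven outer while with nested inner skip while-loops by a single for-loop over the lines carrying a boolean skip flag.
import Mathlib
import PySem

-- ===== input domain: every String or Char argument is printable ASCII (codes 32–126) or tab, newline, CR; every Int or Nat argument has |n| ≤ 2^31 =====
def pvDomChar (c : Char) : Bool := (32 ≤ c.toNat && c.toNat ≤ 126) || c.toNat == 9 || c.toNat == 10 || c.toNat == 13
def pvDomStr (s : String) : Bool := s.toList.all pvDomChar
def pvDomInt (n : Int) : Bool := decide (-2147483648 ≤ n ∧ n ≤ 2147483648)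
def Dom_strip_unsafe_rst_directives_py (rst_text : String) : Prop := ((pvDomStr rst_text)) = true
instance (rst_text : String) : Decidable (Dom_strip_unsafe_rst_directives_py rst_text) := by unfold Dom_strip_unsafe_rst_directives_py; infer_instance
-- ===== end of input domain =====

-- B replaces A's nested index-driven while-loops by a single pass carrying a 'skipping' flag (objective: simpler; same cost).

-- ===== PORT A =====
-- inner 'while i < len(lines) and (lines[i].startswith(" ") or lines[i].strip() == ""): i += 1'
def pvA_skip (lines : List String) : List String :=
  match lines with
  | [] => []
  | l :: rest =>
    if PySem.Str.startswith l " " || PySem.Str.strip l == "" then pvA_skip rest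
    else l :: rest

theorem pvA_skip_length_le (lines : List String) : (pvA_skip lines).length ≤ lines.length := by
  induction lines with
  | nil => simp [pvA_skip]
  | cons l rest ih =>
    simp only [pvA_skip]
    split
    · exact Nat.le_trans ih (Nat.le_succ _)
    · simp

-- outer 'while i < len(lines)' of A, as recursion on the remaining lines
def pvA_loop (lines : List String) : List String :=
  match lines with
  | [] => []
  | l :: rest =>
    if PySem.Str.strip l == ".. container::" then pvA_loop (pvA_skip rest)
    else if PySem.Str.startswith (PySem.Str.strip l) ".. raw::" then pvA_loop (pvA_skip rest)
    else l :: pvA_loop rest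
termination_by lines.length
decreasing_by
  · exact Nat.lt_succ_of_le (pvA_skip_length_le rest)
  · exact Nat.lt_succ_of_le (pvA_skip_length_le rest)
  · simp

def strip_unsafe_rst_directives_py (rst_text : String) : String :=
  PySem.Str.replace (PySem.Str.join "\n" (pvA_loop (PySem.Str.splitlines rst_text))) "\n\n\n\n" "\n\n"

-- ===== PORT B =====
-- single pass over the lines with a boolean 'skipping' flag
def pvB_loop (skipping : Bool) (lines : List String) : List String :=
  match lines with
  | [] => []
  | l :: rest =>
    if skipping && (PySem.Str.startswith l " " || PySem.Str.strip l == "") then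
      pvB_loop true rest
    else
      if PySem.Str.strip l == ".. container::" || PySem.Str.startswith (PySem.Str.strip l) ".. raw::" then
        pvB_loop true rest
      else l :: pvB_loop false rest

def strip_unsafe_rst_directives_py_alt (rst_text : String) : String :=
  PySem.Str.replace (PySem.Str.join "\n" (pvB_loop false (PySem.Str.splitlines rst_text))) "\n\n\n\n" "\n\n"

-- ===== PRECONDITION & SPEC =====
def Spec_strip_unsafe_rst_directives_py (rst_text : String) (out : String) : Prop := out = strip_unsafe_rst_directives_py_alt rst_text
instance (rst_text : String) (out : String) : Decidable (Spec_strip_unsafe_rst_directives_py rst_text out) := by unfold Spec_strip_unsafe_rst_directives_py; infer_instance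

-- ===== CLAIM (what is proved, stated in full; the proofs are below) =====
def Claim_equal_strip_unsafe_rst_directives_py : Prop := ∀ (rst_text : String), Dom_strip_unsafe_rst_directives_py rst_text → Spec_strip_unsafe_rst_directives_py rst_text (strip_unsafe_rst_directives_py rst_text)

-- ===== LEMMAS AND PROOFS =====

-- B in skipping mode behaves like B in normal mode after A's inner skip loop
theorem pvB_true_eq (lines : List String) :
    pvB_loop true lines = pvB_loop false (pvA_skip lines) := by
  induction lines with
  | nil => rfl
  | cons l rest ih =>
    simp only [pvB_loop, pvA_skip, Bool.true_and]
    by_cases h : (PySem.Str.startswith l " " || PySem.Str.strip l == "") = true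
    · rw [if_pos h, if_pos h, ih]
    · rw [if_neg h, if_neg h]
      rfl

-- main loop equivalence, by strong induction on the number of lines
theorem pv_loop_eq (n : Nat) (lines : List String) (hn : lines.length ≤ n) :
    pvA_loop lines = pvB_loop false lines := by
  induction n generalizing lines with
  | zero =>
    have : lines = [] := List.eq_nil_of_length_eq_zero (Nat.le_zero.mp hn)
    subst this; simp [pvA_loop, pvB_loop]
  | succ n ih =>
    match lines with
    | [] => simp [pvA_loop, pvB_loop]
    | l :: rest =>
      have hr : rest.length ≤ n := Nat.lt_succ_iff.mp (by simpa using hn)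
      have hs : (pvA_skip rest).length ≤ n := Nat.le_trans (pvA_skip_length_le rest) hr
      simp only [pvA_loop, pvB_loop, Bool.false_and]
      rw [if_neg Bool.false_ne_true]
      by_cases h1 : (PySem.Str.strip l == ".. container::") = true
      · rw [if_pos h1, if_pos (by rw [Bool.or_eq_true]; exact Or.inl h1), ih _ hs, pvB_true_eq]
      · by_cases h2 : (PySem.Str.startswith (PySem.Str.strip l) ".. raw::") = true
        · rw [if_neg h1, if_pos h2, if_pos (by rw [Bool.or_eq_true]; exact Or.inr h2), ih _ hs, pvB_true_eq]
        · rw [if_neg h1, if_neg h2, if_neg (by rw [Bool.or_eq_true]; rintro (h | h); exacts [h1 h, h2 h]), ih _ hr]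

-- ===== VERDICT (by name: the statement is the Claim_ definition above) =====
theorem strip_unsafe_rst_directives_py_spec : Claim_equal_strip_unsafe_rst_directives_py := by
  intro rst_text _
  unfold Spec_strip_unsafe_rst_directives_py strip_unsafe_rst_directives_py strip_unsafe_rst_directives_py_alt
  rw [pv_loop_eq (PySem.Str.splitlines rst_text).length _ le_rfl]
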